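-- pv_equiv track=rewrite | github.com/loin123-rgb/kid-english-vocab | data/raw/gen_image_prompts_llm.py | assign_priority
-- ===== SOURCE A (Python) =====
-- HIGH_PRI_CATS = {
--     "Animals & insects", "Food & drinks", "Tableware",
--     "Clothing & accessories", "Houses & apartments", "Transportation",
--     "Sports, interests & hobbies", "Holidays & festivals", "Occupations",
--     "Weather & nature", "Geographical terms",
-- }
--
-- MID_PRI_CATS = {
--     "People", "Parts of body", "Health", "School", "Places & locations",
--     "Colors", "Family",
-- }
--
-- ABSTRACT_CATS = {
--     "Other nouns", "Time", "Money", "Sizes & measurements", "Numbers",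
--     "Languages", "Forms of address", "Personal characteristics",
--     "Articles & determiners", "Prepositions", "Conjunctions",
--     "Pronouns & reflexives", "Wh-words", "Be & auxiliaries",
--     "Interjections", "Other verbs",
-- }
--
-- def assign_priority(cats):
--     if any(c in HIGH_PRI_CATS for c in cats):
--         return 1
--     if any(c in MID_PRI_CATS for c in cats):
--         return 2
--     if any(c in ABSTRACT_CATS for c in cats):
--         return 3
--     return 2
-- ===== SOURCE B (Python) =====
-- PRIORITY = {
--     "Animals & insects": 1,
--     "Food & drinks": 1,
--     "Tableware": 1,
--     "Clothing & accessories": 1,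
--     "Houses & apartments": 1,
--     "Transportation": 1,
--     "Sports, interests & hobbies": 1,
--     "Holidays & festivals": 1,
--     "Occupations": 1,
--     "Weather & nature": 1,
--     "Geographical terms": 1,
--     "People": 2,
--     "Parts of body": 2,
--     "Health": 2,
--     "School": 2,
--     "Places & locations": 2,
--     "Colors": 2,
--     "Family": 2,
--     "Other nouns": 3,
--     "Time": 3,
--     "Money": 3,
--     "Sizes & measurements": 3,
--     "Numbers": 3,
--     "Languages": 3,
--     "Forms of address": 3,
--     "Personal characteristics": 3,
--     "Articles & determiners": 3,
--     "Prepositions": 3,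
--     "Conjunctions": 3,
--     "Pronouns & reflexives": 3,
--     "Wh-words": 3,
--     "Be & auxiliaries": 3,
--     "Interjections": 3,
--     "Other verbs": 3,
-- }
--
--
-- def assign_priority(cats):
--     found = [PRIORITY[c] for c in cats if c in PRIORITY]
--     return min(found) if found else 2
-- ===== Notes on version B (the rewrite author's own statement) =====
-- stated objective: simpler
-- what changed: Replaced A's three category sets and three sequential any()-scans with a single category-to-priority dict built once and one list-comprehension pass collecting the priorities found, returning their min (default 2).
import Mathlib
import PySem

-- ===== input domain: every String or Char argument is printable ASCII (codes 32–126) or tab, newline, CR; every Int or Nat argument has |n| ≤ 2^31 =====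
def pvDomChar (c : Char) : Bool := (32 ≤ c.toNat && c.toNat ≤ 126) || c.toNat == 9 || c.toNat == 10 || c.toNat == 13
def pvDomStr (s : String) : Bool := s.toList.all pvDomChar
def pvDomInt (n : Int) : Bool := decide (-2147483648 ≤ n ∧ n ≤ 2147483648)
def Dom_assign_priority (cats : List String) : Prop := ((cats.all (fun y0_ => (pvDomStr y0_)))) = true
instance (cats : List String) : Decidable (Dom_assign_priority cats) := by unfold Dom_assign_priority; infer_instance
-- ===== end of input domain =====

-- B replaces A's three sequential any()-scans with a single category→priority dict built once and one lookup-then-min pass (simpler decomposition; same result).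


set_option maxRecDepth 8192

-- ===== PORT A =====
-- A's module constants (Python sets of distinct strings)
def HIGH_PRI_CATS : List String :=
  ["Animals & insects",
   "Food & drinks",
   "Tableware",
   "Clothing & accessories",
   "Houses & apartments",
   "Transportation",
   "Sports, interests & hobbies",
   "Holidays & festivals",
   "Occupations",
   "Weather & nature",
   "Geographical terms"]

def MID_PRI_CATS : List String :=
  ["People",
   "Parts of body",
   "Health",
   "School",
   "Places & locations",
   "Colors",
   "Family"]

def ABSTRACT_CATS : List String :=
  ["Other nouns",
   "Time",
   "Money",
   "Sizes & measurements",
   "Numbers",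
   "Languages",
   "Forms of address",
   "Personal characteristics",
   "Articles & determiners",
   "Prepositions",
   "Conjunctions",
   "Pronouns & reflexives",
   "Wh-words",
   "Be & auxiliaries",
   "Interjections",
   "Other verbs"]

def assign_priority (cats : List String) : Int :=
  if cats.any (fun c => HIGH_PRI_CATS.contains c) then 1
  else if cats.any (fun c => MID_PRI_CATS.contains c) then 2
  else if cats.any (fun c => ABSTRACT_CATS.contains c) then 3
  else 2

-- ===== PORT B =====
-- B's module constant: one dict literal mapping each category to its priority
def PRIORITY : PySem.Dict String Int :=
  PySem.Dict.ofList
  [("Animals & insects", 1),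
   ("Food & drinks", 1),
   ("Tableware", 1),
   ("Clothing & accessories", 1),
   ("Houses & apartments", 1),
   ("Transportation", 1),
   ("Sports, interests & hobbies", 1),
   ("Holidays & festivals", 1),
   ("Occupations", 1),
   ("Weather & nature", 1),
   ("Geographical terms", 1),
   ("People", 2),
   ("Parts of body", 2),
   ("Health", 2),
   ("School", 2),
   ("Places & locations", 2),
   ("Colors", 2),
   ("Family", 2),
   ("Other nouns", 3),
   ("Time", 3),
   ("Money", 3),
   ("Sizes & measurements", 3),
   ("Numbers", 3),
   ("Languages", 3),
   ("Forms of address", 3),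
   ("Personal characteristics", 3),
   ("Articles & determiners", 3),
   ("Prepositions", 3),
   ("Conjunctions", 3),
   ("Pronouns & reflexives", 3),
   ("Wh-words", 3),
   ("Be & auxiliaries", 3),
   ("Interjections", 3),
   ("Other verbs", 3)]

def assign_priority_alt (cats : List String) : Int :=
  let found := cats.filterMap (fun c => PRIORITY.get? c)
  match PySem.List.min? found (fun x => x) with
  | some m => m
  | none => 2

-- ===== PRECONDITION & SPEC =====
def Spec_assign_priority (cats : List String) (out : Int) : Prop := out = assign_priority_alt cats
instance (cats : List String) (out : Int) : Decidable (Spec_assign_priority cats out) := by unfold Spec_assign_priority; infer_instance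

-- ===== CLAIM (what is proved, stated in full; the proofs are below) =====
def Claim_equal_assign_priority : Prop := ∀ (cats : List String), Dom_assign_priority cats → Spec_assign_priority cats (assign_priority cats)

-- ===== LEMMAS AND PROOFS =====

-- the classification A's branch order induces on a single string
def pvClass (c : String) : Option Int :=
  if HIGH_PRI_CATS.contains c then some 1
  else if MID_PRI_CATS.contains c then some 2
  else if ABSTRACT_CATS.contains c then some 3
  else none

-- the priority A's three scans find in a whole list (none = no known category)
def pvCh (cats : List String) : Option Int :=
  if cats.any (fun c => HIGH_PRI_CATS.contains c) then some 1
  else if cats.any (fun c => MID_PRI_CATS.contains c) then some 2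
  else if cats.any (fun c => ABSTRACT_CATS.contains c) then some 3
  else none

-- min of two optional priorities
def pvMerge (a b : Option Int) : Option Int :=
  match a, b with
  | none, b => b
  | a, none => a
  | some x, some y => some (min x y)

-- PRIORITY as a literal association list (insertion of 34 distinct keys)
def pvItems : List (String × Int) :=
  [("Animals & insects", 1),
   ("Food & drinks", 1),
   ("Tableware", 1),
   ("Clothing & accessories", 1),
   ("Houses & apartments", 1),
   ("Transportation", 1),
   ("Sports, interests & hobbies", 1),
   ("Holidays & festivals", 1),
   ("Occupations", 1),
   ("Weather & nature", 1),
   ("Geographical terms", 1),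
   ("People", 2),
   ("Parts of body", 2),
   ("Health", 2),
   ("School", 2),
   ("Places & locations", 2),
   ("Colors", 2),
   ("Family", 2),
   ("Other nouns", 3),
   ("Time", 3),
   ("Money", 3),
   ("Sizes & measurements", 3),
   ("Numbers", 3),
   ("Languages", 3),
   ("Forms of address", 3),
   ("Personal characteristics", 3),
   ("Articles & determiners", 3),
   ("Prepositions", 3),
   ("Conjunctions", 3),
   ("Pronouns & reflexives", 3),
   ("Wh-words", 3),
   ("Be & auxiliaries", 3),
   ("Interjections", 3),
   ("Other verbs", 3)]

theorem pvPRIORITY_eq : PRIORITY = PySem.Dict.mk pvItems := by rfl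

-- B's dict lookup agrees with A's three membership tests
theorem get?_PRIORITY (c : String) : PRIORITY.get? c = pvClass c := by
  rw [pvPRIORITY_eq]
  by_cases h1 : c = "Animals & insects"
  · subst h1; decide
  by_cases h2 : c = "Food & drinks"
  · subst h2; decide
  by_cases h3 : c = "Tableware"
  · subst h3; decide
  by_cases h4 : c = "Clothing & accessories"
  · subst h4; decide
  by_cases h5 : c = "Houses & apartments"
  · subst h5; decide
  by_cases h6 : c = "Transportation"
  · subst h6; decide
  by_cases h7 : c = "Sports, interests & hobbies"
  · subst h7; decide
  by_cases h8 : c = "Holidays & festivals"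
  · subst h8; decide
  by_cases h9 : c = "Occupations"
  · subst h9; decide
  by_cases h10 : c = "Weather & nature"
  · subst h10; decide
  by_cases h11 : c = "Geographical terms"
  · subst h11; decide
  by_cases h12 : c = "People"
  · subst h12; decide
  by_cases h13 : c = "Parts of body"
  · subst h13; decide
  by_cases h14 : c = "Health"
  · subst h14; decide
  by_cases h15 : c = "School"
  · subst h15; decide
  by_cases h16 : c = "Places & locations"
  · subst h16; decide
  by_cases h17 : c = "Colors"
  · subst h17; decide
  by_cases h18 : c = "Family"
  · subst h18; decide
  by_cases h19 : c = "Other nouns"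
  · subst h19; decide
  by_cases h20 : c = "Time"
  · subst h20; decide
  by_cases h21 : c = "Money"
  · subst h21; decide
  by_cases h22 : c = "Sizes & measurements"
  · subst h22; decide
  by_cases h23 : c = "Numbers"
  · subst h23; decide
  by_cases h24 : c = "Languages"
  · subst h24; decide
  by_cases h25 : c = "Forms of address"
  · subst h25; decide
  by_cases h26 : c = "Personal characteristics"
  · subst h26; decide
  by_cases h27 : c = "Articles & determiners"
  · subst h27; decide
  by_cases h28 : c = "Prepositions"
  · subst h28; decide
  by_cases h29 : c = "Conjunctions"
  · subst h29; decide
  by_cases h30 : c = "Pronouns & reflexives"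
  · subst h30; decide
  by_cases h31 : c = "Wh-words"
  · subst h31; decide
  by_cases h32 : c = "Be & auxiliaries"
  · subst h32; decide
  by_cases h33 : c = "Interjections"
  · subst h33; decide
  by_cases h34 : c = "Other verbs"
  · subst h34; decide
  simp [pvItems, pvClass, HIGH_PRI_CATS, MID_PRI_CATS, ABSTRACT_CATS,
    h1, h2, h3, h4, h5, h6, h7, h8, h9, h10, h11, h12, h13, h14, h15, h16, h17, h18, h19, h20, h21, h22, h23, h24, h25, h26, h27, h28, h29, h30, h31, h32, h33, h34,
    PySem.Dict.get?, Ne.symm h1, Ne.symm h2, Ne.symm h3, Ne.symm h4, Ne.symm h5, Ne.symm h6, Ne.symm h7, Ne.symm h8, Ne.symm h9, Ne.symm h10, Ne.symm h11, Ne.symm h12, Ne.symm h13, Ne.symm h14, Ne.symm h15, Ne.symm h16, Ne.symm h17, Ne.symm h18, Ne.symm h19, Ne.symm h20, Ne.symm h21, Ne.symm h22, Ne.symm h23, Ne.symm h24, Ne.symm h25, Ne.symm h26, Ne.symm h27, Ne.symm h28, Ne.symm h29, Ne.symm h30, Ne.symm h31, Ne.symm h32, Ne.symm h33, Ne.symm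 h34]

theorem pvCh_cons (c : String) (cs : List String) :
    pvCh (c :: cs) = pvMerge (pvClass c) (pvCh cs) := by
  unfold pvCh pvClass
  simp only [List.any_cons]
  rcases Bool.eq_false_or_eq_true (HIGH_PRI_CATS.contains c) with h1 | h1 <;>
    rcases Bool.eq_false_or_eq_true (MID_PRI_CATS.contains c) with h2 | h2 <;>
      rcases Bool.eq_false_or_eq_true (ABSTRACT_CATS.contains c) with h3 | h3 <;>
        rcases Bool.eq_false_or_eq_true (cs.any fun c => HIGH_PRI_CATS.contains c) with k1 | k1 <;>
          rcases Bool.eq_false_or_eq_true (cs.any fun c => MID_PRI_CATS.contains c) with k2 | k2 <;>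
            rcases Bool.eq_false_or_eq_true (cs.any fun c => ABSTRACT_CATS.contains c) with k3 | k3 <;>
              simp only [h1, h2, h3, k1, k2, k3] <;> decide

theorem foldl_min_eq (t : List Int) (x : Int) :
    t.foldl min x = match PySem.List.min? t (fun y => y) with
      | none => x
      | some m => min x m := by
  induction t generalizing x with
  | nil => simp [PySem.List.min?]
  | cons y t ih =>
    rw [List.foldl_cons, ih, PySem.List.min?_id_cons, ih y]
    cases h : PySem.List.min? t (fun y => y) with
    | none => simp
    | some m => simp [min_assoc]

theorem min?_filterMap_eq_pvCh (cs : List String) :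
    PySem.List.min? (cs.filterMap (fun c => PRIORITY.get? c)) (fun x => x) = pvCh cs := by
  induction cs with
  | nil => simp [PySem.List.min?, pvCh]
  | cons c cs ih =>
    rw [List.filterMap_cons, pvCh_cons, ← get?_PRIORITY]
    cases h : PRIORITY.get? c with
    | none => simpa [pvMerge] using ih
    | some p =>
      rw [PySem.List.min?_id_cons, foldl_min_eq, ih]
      cases hc : pvCh cs <;> simp [pvMerge]

-- ===== VERDICT (by name: the statement is the Claim_ definition above) =====
theorem assign_priority_spec : Claim_equal_assign_priority := by
  intro cats _
  unfold Spec_assign_priority assign_priority assign_priority_alt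
  simp only [min?_filterMap_eq_pvCh]
  unfold pvCh
  split_ifs <;> rfl
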